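-- pv_equiv track=rewrite | github.com/ataguchi35/boat-wind | wind_utils.py | classify_effect_zone
-- ===== SOURCE A (Python) =====
-- def classify_effect_zone(deviation):
--     zones = [
--         (-180, -135, "H（かなり不利）"),
--         (-135, -90,  "G（とても不利）"),
--         (-90, -45,   "F（やや不利）"),
--         (-45, 0,     "E（普通）"),
--         (0, 45,      "D（やや有利）"),
--         (45, 90,     "C（とても有利）"),
--         (90, 135,    "B（かなり有利）"),
--         (135, 180,   "A（最大有利）"),
--     ]
--     for low, high, label in zones:
--         if low < deviation <= high:
--             return label
--     return "？"
-- ===== SOURCE B (Python) =====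
-- _LABELS = [
--     "H（かなり不利）",
--     "G（とても不利）",
--     "F（やや不利）",
--     "E（普通）",
--     "D（やや有利）",
--     "C（とても有利）",
--     "B（かなり有利）",
--     "A（最大有利）",
-- ]
--
-- def classify_effect_zone(deviation):
--     if -180 < deviation <= 180:
--         return _LABELS[(deviation + 179) // 45]
--     return "？"
-- ===== Notes on version B (the rewrite author's own statement) =====
-- stated objective: simpler
-- what changed: Replaced the 8-interval linear scan over (low, high, label) tuples with a single range guard and a closed-form ceiling-division index into a flat label list.
import Mathlib
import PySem

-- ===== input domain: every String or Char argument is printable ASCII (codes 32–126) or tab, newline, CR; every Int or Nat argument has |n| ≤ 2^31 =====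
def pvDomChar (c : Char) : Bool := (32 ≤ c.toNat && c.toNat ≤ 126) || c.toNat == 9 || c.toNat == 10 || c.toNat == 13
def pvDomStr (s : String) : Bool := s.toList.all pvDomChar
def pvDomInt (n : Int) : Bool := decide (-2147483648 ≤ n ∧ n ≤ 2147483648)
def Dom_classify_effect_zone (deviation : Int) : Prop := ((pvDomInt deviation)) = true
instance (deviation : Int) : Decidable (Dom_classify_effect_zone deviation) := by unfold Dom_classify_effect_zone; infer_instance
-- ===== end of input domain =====

-- B replaces A's linear scan over 8 (low, high, label) intervals with one range guard
-- and a closed-form floor-division index into a flat label list (objective: simpler).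

-- ===== PORT A =====
-- the for-loop over the zones list with early return on the first matching interval
def pvZoneScan : List (Int × Int × String) → Int → String
  | [], _ => "？"
  | (low, high, label) :: rest, d =>
      if low < d ∧ d ≤ high then label else pvZoneScan rest d

def classify_effect_zone (deviation : Int) : String :=
  pvZoneScan
    [ (-180, -135, "H（かなり不利）"),
      (-135, -90,  "G（とても不利）"),
      (-90, -45,   "F（やや不利）"),
      (-45, 0,     "E（普通）"),
      (0, 45,      "D（やや有利）"),
      (45, 90,     "C（とても有利）"),
      (90, 135,    "B（かなり有利）"),
      (135, 180,   "A（最大有利）") ] deviation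

-- ===== PORT B =====
def pvLabels : List String :=
  [ "H（かなり不利）", "G（とても不利）", "F（やや不利）", "E（普通）",
    "D（やや有利）", "C（とても有利）", "B（かなり有利）", "A（最大有利）" ]

-- _LABELS[(deviation + 179) // 45]; the guard ensures the index is in range, so the
-- indexing never raises (the 'none' arm is unreachable)
def classify_effect_zone_alt (deviation : Int) : String :=
  if -180 < deviation ∧ deviation ≤ 180 then
    match PySem.List.pyGet? pvLabels (PySem.Int.floordiv (deviation + 179) 45) with
    | some l => l
    | none => "？"
  else "？"

-- ===== PRECONDITION & SPEC =====
def Spec_classify_effect_zone (deviation : Int) (out : String) : Prop := out = classify_effect_zone_alt deviation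
instance (deviation : Int) (out : String) : Decidable (Spec_classify_effect_zone deviation out) := by unfold Spec_classify_effect_zone; infer_instance

-- ===== CLAIM (what is proved, stated in full; the proofs are below) =====
def Claim_equal_classify_effect_zone : Prop := ∀ (deviation : Int), Dom_classify_effect_zone deviation → Spec_classify_effect_zone deviation (classify_effect_zone deviation)

-- ===== LEMMAS AND PROOFS =====

-- B agrees with the scan on each of the 8 intervals: there the index is exactly k
theorem pvAlt_interval (d k : Int) (hk0 : 0 ≤ k) (hk7 : k ≤ 7)
    (hlo : 45 * k - 180 < d) (hhi : d ≤ 45 * k - 135) :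
    classify_effect_zone_alt d =
      (PySem.List.pyGet? pvLabels k).getD "？" := by
  have hidx : PySem.Int.floordiv (d + 179) 45 = k := by
    rw [PySem.Int.floordiv_eq_iff_of_pos (by norm_num)]
    omega
  unfold classify_effect_zone_alt
  rw [if_pos (by omega), hidx]
  rcases PySem.List.pyGet? pvLabels k with _ | l <;> rfl

theorem classify_effect_zone_eq (d : Int) :
    classify_effect_zone d = classify_effect_zone_alt d := by
  simp only [classify_effect_zone, pvZoneScan]
  split_ifs with h1 h2 h3 h4 h5 h6 h7 h8
  · rw [pvAlt_interval d 0 (by norm_num) (by norm_num) (by omega) (by omega)]; decide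
  · rw [pvAlt_interval d 1 (by norm_num) (by norm_num) (by omega) (by omega)]; decide
  · rw [pvAlt_interval d 2 (by norm_num) (by norm_num) (by omega) (by omega)]; decide
  · rw [pvAlt_interval d 3 (by norm_num) (by norm_num) (by omega) (by omega)]; decide
  · rw [pvAlt_interval d 4 (by norm_num) (by norm_num) (by omega) (by omega)]; decide
  · rw [pvAlt_interval d 5 (by norm_num) (by norm_num) (by omega) (by omega)]; decide
  · rw [pvAlt_interval d 6 (by norm_num) (by norm_num) (by omega) (by omega)]; decide
  · rw [pvAlt_interval d 7 (by norm_num) (by norm_num) (by omega) (by omega)]; decide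
  · unfold classify_effect_zone_alt
    rw [if_neg (by omega)]

-- ===== VERDICT (by name: the statement is the Claim_ definition above) =====
theorem classify_effect_zone_spec : Claim_equal_classify_effect_zone := by
  intro d _
  unfold Spec_classify_effect_zone
  exact classify_effect_zone_eq d
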